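-- pv_equiv track=rewrite | github.com/95ellismle/Orbital-Visualiser | src/load_xyz.py | find_time_delimeter
-- ===== SOURCE A (Python) =====
-- def find_time_delimeter(step, filename):
--     for linenum,txt in enumerate(step):
--         txt = txt.lower()
--         if 'time' in txt:
--             break
--     else:
--         raise SystemExit ("Can't find the word 'time' in this data:\n\n%s\n\n\tFilename:%s"%(str(step), filename) )
--     prev_char, count = False, 0
--     txt = txt[txt.find("time"):]
--     for char in txt.replace(" ",""):
--         isnum = (char.isdigit() or char == '.')
--         if isnum != prev_char:
--             count += 1
--         prev_char = isnum
--         if count == 2: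
--             break
--     if char.isdigit(): return '\n', linenum
--     else: return char, linenum
--
--     raise SystemError("Cannot find the delimeter for the time-step info in the following xyz_file:\n\n%s\n\nstep = %s"%(filename,step))
-- ===== SOURCE B (Python) =====
-- def find_time_delimeter(step, filename):
--     linenum = next((i for i, txt in enumerate(step) if 'time' in txt.lower()), None)
--     if linenum is None:
--         raise SystemExit("Can't find the word 'time' in this data:\n\n%s\n\n\tFilename:%s" % (str(step), filename))
--     txt = step[linenum].lower()
--     s = txt[txt.find("time"):].replace(" ", "")
--
--     def isnum(c):
--         return c.isdigit() or c == '.'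
--
--     i = 0
--     while i < len(s) and not isnum(s[i]):   # skip the leading non-numeric run ("time...")
--         i += 1
--     while i < len(s) and isnum(s[i]):       # skip the first numeric run
--         i += 1
--     if i < len(s):
--         return s[i], linenum                # first char after the first numeric run (never a digit)
--     return ('\n' if s[-1].isdigit() else s[-1]), linenum
-- ===== Notes on version B (the rewrite author's own statement) =====
-- stated objective: simpler
-- what changed: Replaces A's transition-counting state machine (prev_char/count/break) over the cleaned header line by two plain run-skipping scans: skip the leading non-numeric run, skip the first numeric run, and return the character that follows (or the '\n'/last-char fall-through when the line ends); the line search also becomes a direct first-index lookup.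
import Mathlib
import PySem

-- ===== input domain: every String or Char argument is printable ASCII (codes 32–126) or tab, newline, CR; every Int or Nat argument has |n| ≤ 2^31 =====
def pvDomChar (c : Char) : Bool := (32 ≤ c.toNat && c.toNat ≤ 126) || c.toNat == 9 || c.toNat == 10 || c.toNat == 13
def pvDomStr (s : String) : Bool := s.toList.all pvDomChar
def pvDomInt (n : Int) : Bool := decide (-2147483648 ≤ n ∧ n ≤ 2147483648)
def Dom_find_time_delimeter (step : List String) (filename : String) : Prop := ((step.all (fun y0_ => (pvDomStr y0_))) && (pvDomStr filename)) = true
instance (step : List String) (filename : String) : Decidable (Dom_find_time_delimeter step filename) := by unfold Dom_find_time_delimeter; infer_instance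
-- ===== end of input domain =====

-- B replaces A's transition-counting state machine by two run-skipping scans (skip the
-- leading non-numeric run, skip the first numeric run, return what follows): simpler.

-- ===== PORT A =====
-- char.isdigit() or char == '.'
def pvIsNumA (c : Char) : Bool := PySem.Chars.isdigit c || c == '.'

-- the 'for linenum,txt in enumerate(step): … if 'time' in txt: break / else raise' search;
-- none = the for-else SystemExit (excluded by Pre_)
def pvFindLineA : List String → Nat → Option (Nat × List Char)
  | [], _ => none
  | t :: rest, i =>
    let tl := PySem.Chars.lower t.toList
    if PySem.Chars.isIn "time".toList tl then some (i, tl) else pvFindLineA rest (i + 1)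

-- the transition-counting loop: state (prev_char, count, char); returns Python's 'char' after the loop
def pvLoopA : List Char → Bool → Nat → Char → Char
  | [], _, _, ch => ch
  | c :: rest, prev, count, _ =>
    let isnum := pvIsNumA c
    let count' := if isnum ≠ prev then count + 1 else count
    if count' = 2 then c else pvLoopA rest isnum count' c

def find_time_delimeter (step : List String) (filename : String) : String × Int :=
  match pvFindLineA step 0 with
  | none => ("", -1)   -- unreachable under Pre_ (Python raises SystemExit here)
  | some (linenum, txt) =>
    let txt := PySem.Chars.slice txt (some (PySem.Chars.find txt "time".toList)) none
    let ch := pvLoopA (PySem.Chars.replace txt " ".toList "".toList) false 0 'A'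
    (if PySem.Chars.isdigit ch then "\n" else String.ofList [ch], (linenum : Int))

-- ===== PORT B =====
def pvIsNumB (c : Char) : Bool := PySem.Chars.isdigit c || c == '.'

-- next((i for i, txt in enumerate(step) if 'time' in txt.lower()), None)
def pvFindIdxB : List String → Nat → Option Nat
  | [], _ => none
  | t :: rest, i =>
    if PySem.Chars.isIn "time".toList (PySem.Chars.lower t.toList) then some i
    else pvFindIdxB rest (i + 1)

-- while i < len(s) and not isnum(s[i]): i += 1   (the suffix s.drop i is the state)
def pvSkipNonB : List Char → List Char
  | [] => []
  | c :: r => if !(pvIsNumB c) then pvSkipNonB r else c :: r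

-- while i < len(s) and isnum(s[i]): i += 1
def pvSkipNumB : List Char → List Char
  | [] => []
  | c :: r => if pvIsNumB c then pvSkipNumB r else c :: r

def find_time_delimeter_alt (step : List String) (filename : String) : String × Int :=
  match pvFindIdxB step 0 with
  | none => ("", -1)   -- unreachable under Pre_ (Python raises SystemExit here)
  | some linenum =>
    let txt := PySem.Chars.lower (PySem.List.pyGetD step (linenum : Int) "").toList
    let s := PySem.Chars.replace
      (PySem.Chars.slice txt (some (PySem.Chars.find txt "time".toList)) none) " ".toList "".toList
    match pvSkipNumB (pvSkipNonB s) with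
    | c :: _ => (String.ofList [c], (linenum : Int))
    | [] =>
      let last := PySem.List.pyGetD s (-1) 'A'
      (if PySem.Chars.isdigit last then "\n" else String.ofList [last], (linenum : Int))

-- ===== PRECONDITION & SPEC =====
-- Pre_: some line contains "time" after lowercasing — exactly where A does not raise SystemExit.
def Pre_find_time_delimeter (step : List String) (filename : String) : Prop :=
  ∃ t ∈ step, PySem.Chars.isIn "time".toList (PySem.Chars.lower t.toList) = true
instance (step : List String) (filename : String) : Decidable (Pre_find_time_delimeter step filename) := by
  unfold Pre_find_time_delimeter; infer_instance

def pvWitness_find_time_delimeter : List String × String := (["3 atoms", "Time = 0.5fs, x"], "f.xyz")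

def Spec_find_time_delimeter (step : List String) (filename : String) (out : String × Int) : Prop := out = find_time_delimeter_alt step filename
instance (step : List String) (filename : String) (out : String × Int) : Decidable (Spec_find_time_delimeter step filename out) := by unfold Spec_find_time_delimeter; infer_instance

-- ===== CLAIM (what is proved, stated in full; the proofs are below) =====
def Claim_equal_find_time_delimeter : Prop := ∀ (step : List String) (filename : String), Dom_find_time_delimeter step filename → Pre_find_time_delimeter step filename → Spec_find_time_delimeter step filename (find_time_delimeter step filename)

-- ===== LEMMAS AND PROOFS =====

lemma pvIsNum_eq : pvIsNumB = pvIsNumA := rfl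

-- B's index search finds the same line that A's enumerate-break search carries along.
lemma pvFind_corr : ∀ (step : List String) (i n : Nat),
    pvFindIdxB step i = some n →
    i ≤ n ∧ pvFindLineA step i =
      some (n, PySem.Chars.lower ((PySem.List.pyGetD step ((n : Int) - (i : Int)) "").toList)) := by
  intro step
  induction step with
  | nil => intro i n h; simp [pvFindIdxB] at h
  | cons t rest ih =>
    intro i n h
    simp only [pvFindIdxB] at h
    split at h
    · rename_i hc
      obtain rfl : i = n := Option.some.inj h
      refine ⟨le_rfl, ?_⟩
      simp only [pvFindLineA]
      rw [if_pos hc, show (i : Int) - (i : Int) = ((0 : Nat) : Int) from by omega,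
        PySem.List.pyGetD_natCast]
      rfl
    · rename_i hc
      obtain ⟨hle, heq⟩ := ih (i + 1) n h
      refine ⟨by omega, ?_⟩
      have e1 : (n : Int) - (i : Int) = ((n - i : Nat) : Int) := by omega
      have e2 : (n : Int) - ((i + 1 : Nat) : Int) = ((n - i - 1 : Nat) : Int) := by push_cast; omega
      rw [e2] at heq
      have egd : (t :: rest).getD (n - i) "" = rest.getD (n - i - 1) "" := by
        have : n - i = (n - i - 1) + 1 := by omega
        rw [this]; rfl
      simp only [pvFindLineA, hc, heq, e1, PySem.List.pyGetD_natCast, egd]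
      simp

-- Pre_ guarantees B's search (and hence A's) succeeds
lemma pvFindIdxB_isSome : ∀ (step : List String) (i : Nat),
    (∃ t ∈ step, PySem.Chars.isIn "time".toList (PySem.Chars.lower t.toList) = true) →
    (pvFindIdxB step i).isSome := by
  intro step
  induction step with
  | nil => intro i h; simp at h
  | cons t rest ih =>
    intro i h
    simp only [pvFindIdxB]
    split
    · rfl
    · rename_i hc
      apply ih
      obtain ⟨u, hu, huu⟩ := h
      rcases List.mem_cons.mp hu with rfl | hu'
      · exact absurd huu hc
      · exact ⟨u, hu', huu⟩

-- Python's s[-1] with default d is getLastD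
lemma pyGetD_neg_one_getLastD (s : List Char) (d : Char) :
    PySem.List.pyGetD s (-1) d = s.getLastD d := by
  rw [show PySem.List.pyGetD s (-1) d = (PySem.List.pyGet? s (-1)).getD d from rfl,
    PySem.List.pyGet?_neg_one, List.getLastD_eq_getLast?]

-- head of pvSkipNumB's result is non-numeric
lemma skipNum_head : ∀ (s : List Char) (c : Char) (t : List Char),
    pvSkipNumB s = c :: t → pvIsNumB c = false := by
  intro s
  induction s with
  | nil => intro c t h; simp [pvSkipNumB] at h
  | cons a r ih =>
    intro c t h
    simp only [pvSkipNumB] at h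
    split at h
    · exact ih _ _ h
    · cases h; rename_i hc; simpa using hc

-- A's count = 1 phase (prev_char numeric): the loop walks the first numeric run
lemma loopA_phase1 : ∀ (s : List Char) (d : Char),
    pvLoopA s true 1 d =
      (match pvSkipNumB s with
       | c :: _ => c
       | [] => s.getLastD d) := by
  intro s
  induction s with
  | nil => intro d; simp [pvLoopA, pvSkipNumB]
  | cons c r ih =>
    intro d
    by_cases h : pvIsNumA c = true
    · have hl : pvLoopA (c :: r) true 1 d = pvLoopA r true 1 c := by
        simp [pvLoopA, h]
      have hs : pvSkipNumB (c :: r) = pvSkipNumB r := by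
        simp [pvSkipNumB, pvIsNum_eq, h]
      rw [hl, ih, hs]
      cases hsk : pvSkipNumB r with
      | nil => rw [List.getLastD_cons]
      | cons a t => rfl
    · have hl : pvLoopA (c :: r) true 1 d = c := by
        simp [pvLoopA, h]
      have hs : pvSkipNumB (c :: r) = c :: r := by
        simp [pvSkipNumB, pvIsNum_eq, h]
      rw [hl, hs]

-- A's count = 0 phase: the whole loop against B's two run-skipping scans
lemma loopA_phase0 : ∀ (s : List Char) (d : Char),
    pvLoopA s false 0 d =
      (match pvSkipNumB (pvSkipNonB s) with
       | c :: _ => c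
       | [] => s.getLastD d) := by
  intro s
  induction s with
  | nil => intro d; simp [pvLoopA, pvSkipNonB, pvSkipNumB]
  | cons c r ih =>
    intro d
    by_cases h : pvIsNumA c = true
    · have hl : pvLoopA (c :: r) false 0 d = pvLoopA r true 1 c := by
        simp [pvLoopA, h]
      have hs : pvSkipNonB (c :: r) = c :: r := by
        simp [pvSkipNonB, pvIsNum_eq, h]
      rw [hl, loopA_phase1, hs]
      have hs2 : pvSkipNumB (c :: r) = pvSkipNumB r := by
        simp [pvSkipNumB, pvIsNum_eq, h]
      rw [hs2]
      cases hsk : pvSkipNumB r with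
      | nil => rw [List.getLastD_cons]
      | cons a t => rfl
    · have hl : pvLoopA (c :: r) false 0 d = pvLoopA r false 0 c := by
        simp [pvLoopA, h]
      have hs : pvSkipNonB (c :: r) = pvSkipNonB r := by
        simp [pvSkipNonB, pvIsNum_eq, h]
      rw [hl, ih, hs]
      cases hsk : pvSkipNumB (pvSkipNonB r) with
      | nil => rw [List.getLastD_cons]
      | cons a t => rfl

-- ===== VERDICT (by name: the statement is the Claim_ definition above) =====
theorem find_time_delimeter_spec : Claim_equal_find_time_delimeter := by
  intro step filename _hdom hpre
  show find_time_delimeter step filename = find_time_delimeter_alt step filename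
  obtain ⟨n, hn⟩ : ∃ n, pvFindIdxB step 0 = some n :=
    Option.isSome_iff_exists.mp (pvFindIdxB_isSome step 0 hpre)
  obtain ⟨-, hla⟩ := pvFind_corr step 0 n hn
  have hla' : pvFindLineA step 0 =
      some (n, PySem.Chars.lower ((PySem.List.pyGetD step (n : Int) "").toList)) := by
    simpa using hla
  unfold find_time_delimeter find_time_delimeter_alt
  rw [hn, hla']
  simp only []
  rw [loopA_phase0]
  cases hsk : pvSkipNumB (pvSkipNonB (PySem.Chars.replace
      (PySem.Chars.slice (PySem.Chars.lower (PySem.List.pyGetD step (n : Int) "").toList)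
        (some (PySem.Chars.find (PySem.Chars.lower (PySem.List.pyGetD step (n : Int) "").toList)
          "time".toList)) none) " ".toList "".toList)) with
  | nil => rw [pyGetD_neg_one_getLastD]
  | cons c t =>
    have hc : pvIsNumB c = false := skipNum_head _ _ _ hsk
    have hd : PySem.Chars.isdigit c = false := by
      revert hc; simp [pvIsNumB]; tauto
    simp [hd]
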